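-- pv_equiv track=rewrite | github.com/megumi-ben/work13-wd | PNS/baselines/pns_pmns_v1/pns_pmns.py | _dedup_sorted
-- ===== SOURCE A (Python) =====
-- from typing import Dict, Iterable, List, Optional, Sequence, Tuple
--
-- def _dedup_sorted(items: Iterable[Tuple[int, int]]) -> List[Tuple[int, int]]:
--     seen = set()
--     out: List[Tuple[int, int]] = []
--     for item in sorted(items, key=lambda x: (x[0], x[1])):
--         if item not in seen:
--             out.append(item)
--             seen.add(item)
--     return out
-- ===== SOURCE B (Python) =====
-- from typing import Iterable, List, Tuple
--
-- def _dedup_sorted(items: Iterable[Tuple[int, int]]) -> List[Tuple[int, int]]: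
--     # Deduplicate first, sort second: Python's default tuple comparison is
--     # exactly the lexicographic key (x[0], x[1]) A uses, so sorting the
--     # distinct pairs yields the same list.
--     return sorted(set(items))
-- ===== Notes on version B (the rewrite author's own statement) =====
-- stated objective: idiomatic
-- what changed: The two stages are swapped and the scan disappears: B deduplicates first (set(items)) and then sorts the distinct pairs, instead of sorting everything and filtering duplicates with a seen-set during a pass; correct because the default tuple order equals A's key (x[0], x[1]) and both yield the unique strictly increasing arrangement of the distinct pairs.
import Mathlib
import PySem

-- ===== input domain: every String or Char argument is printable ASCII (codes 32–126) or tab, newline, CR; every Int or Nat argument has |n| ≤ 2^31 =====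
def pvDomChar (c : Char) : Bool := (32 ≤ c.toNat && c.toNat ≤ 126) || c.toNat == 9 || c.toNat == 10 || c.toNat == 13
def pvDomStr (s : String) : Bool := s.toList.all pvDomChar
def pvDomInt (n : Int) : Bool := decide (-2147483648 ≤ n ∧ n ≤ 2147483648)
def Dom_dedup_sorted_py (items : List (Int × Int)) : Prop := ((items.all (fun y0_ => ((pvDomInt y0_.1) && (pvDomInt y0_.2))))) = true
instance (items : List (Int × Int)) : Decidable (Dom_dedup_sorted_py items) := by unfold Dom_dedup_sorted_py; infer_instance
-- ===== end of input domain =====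

-- B swaps the stages: dedup first (set(items)) then sort the distinct pairs, instead of A's sort-everything-then-filter-with-a-seen-set pass.

-- ===== PORT A =====
def dedup_sorted_py (items : List (Int × Int)) : List (Int × Int) :=
  ((PySem.List.sorted2 items (fun x => x.1) (fun x => x.2)).foldl
    (fun (st : PySem.Set (Int × Int) × List (Int × Int)) item =>
      if !(PySem.Set.contains st.1 item) then (PySem.Set.add st.1 item, st.2 ++ [item]) else st)
    (PySem.Set.empty, [])).2

-- ===== PORT B =====
-- sorted(set(items)): Python's default tuple comparison is lexicographic, i.e. sorted2 with component keys (exact).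
def dedup_sorted_py_alt (items : List (Int × Int)) : List (Int × Int) :=
  PySem.List.sorted2 (PySem.Set.ofList items) (fun x => x.1) (fun x => x.2)

-- ===== PRECONDITION & SPEC =====
def Spec_dedup_sorted_py (items : List (Int × Int)) (out : List (Int × Int)) : Prop := out = dedup_sorted_py_alt items
instance (items : List (Int × Int)) (out : List (Int × Int)) : Decidable (Spec_dedup_sorted_py items out) := by unfold Spec_dedup_sorted_py; infer_instance

-- ===== CLAIM (what is proved, stated in full; the proofs are below) =====
def Claim_equal_dedup_sorted_py : Prop := ∀ (items : List (Int × Int)), Dom_dedup_sorted_py items → Spec_dedup_sorted_py items (dedup_sorted_py items)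

-- ===== LEMMAS AND PROOFS =====

-- the strict lexicographic comparator sorted2 uses for key (x.1, x.2)
def pvLt (a b : Int × Int) : Bool :=
  decide (a.1 < b.1) || (!decide (b.1 < a.1) && decide (a.2 < b.2))

lemma pvLt_irrefl (a : Int × Int) : pvLt a a = false := by simp [pvLt]

lemma pvLt_asym (a b : Int × Int) (h : pvLt a b = true) : pvLt b a = false := by
  simp [pvLt] at *; omega

lemma pvLt_total_ne (a b : Int × Int) (h1 : pvLt a b = false) (hne : a ≠ b) :
    pvLt b a = true := by
  obtain ⟨a1, a2⟩ := a; obtain ⟨b1, b2⟩ := b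
  have hne2 : a1 ≠ b1 ∨ a2 ≠ b2 := by
    by_contra hc
    push Not at hc
    exact hne (by simp [hc.1, hc.2])
  simp [pvLt] at h1 ⊢
  omega

lemma insertBy_pairwise (x : Int × Int) (l : List (Int × Int))
    (h : l.Pairwise (fun a b => pvLt b a = false)) :
    (PySem.List.insertBy (fun a b => pvLt a b) x l).Pairwise (fun a b => pvLt b a = false) := by
  induction l with
  | nil => simp [PySem.List.insertBy]
  | cons y ys ih =>
    rw [List.pairwise_cons] at h
    obtain ⟨hy, hys⟩ := h
    by_cases hxy : pvLt x y = true
    · have heq : PySem.List.insertBy (fun a b => pvLt a b) x (y :: ys) = x :: y :: ys := by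
        simp [PySem.List.insertBy, hxy]
      rw [heq, List.pairwise_cons]
      refine ⟨?_, List.pairwise_cons.2 ⟨hy, hys⟩⟩
      intro z hz
      rcases List.mem_cons.1 hz with rfl | hz
      · exact pvLt_asym x z hxy
      · cases hzx : pvLt z x with
        | false => rfl
        | true =>
          -- z after y in a sorted list, but pvLt z x and pvLt x y give pvLt z y: contradiction
          have hzy : pvLt z y = true := by
            have h1 := hzx; have h2 := hxy
            simp [pvLt] at h1 h2 ⊢; omega
          rw [hy z hz] at hzy
          exact absurd hzy (by simp)
    · have heq : PySem.List.insertBy (fun a b => pvLt a b) x (y :: ys) =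
          y :: PySem.List.insertBy (fun a b => pvLt a b) x ys := by
        simp [PySem.List.insertBy, hxy]
      rw [heq, List.pairwise_cons]
      refine ⟨?_, ih hys⟩
      intro z hz
      rcases (PySem.List.mem_insertBy _ _ _ _).1 hz with rfl | hz
      · simpa using hxy
      · exact hy z hz

lemma foldl_insertBy_pairwise (l acc : List (Int × Int))
    (h : acc.Pairwise (fun a b => pvLt b a = false)) :
    (l.foldl (fun acc x => PySem.List.insertBy (fun a b => pvLt a b) x acc) acc).Pairwise
      (fun a b => pvLt b a = false) := by
  induction l generalizing acc with
  | nil => simpa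
  | cons x xs ih => exact ih _ (insertBy_pairwise x acc h)

lemma sorted2_eq_foldl (items : List (Int × Int)) :
    PySem.List.sorted2 items (fun x => x.1) (fun x => x.2) =
      items.foldl (fun acc x => PySem.List.insertBy (fun a b => pvLt a b) x acc) [] := rfl

lemma sorted2_pairwise (items : List (Int × Int)) :
    (PySem.List.sorted2 items (fun x => x.1) (fun x => x.2)).Pairwise
      (fun a b => pvLt b a = false) := by
  rw [sorted2_eq_foldl]
  exact foldl_insertBy_pairwise items [] (by simp)

-- a list that is pairwise non-descending and duplicate-free is pairwise STRICTLY ascending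
lemma pairwise_lt_of_pairwise_nge_nodup (l : List (Int × Int))
    (h : l.Pairwise (fun a b => pvLt b a = false)) (hn : l.Nodup) :
    l.Pairwise (fun a b => pvLt a b = true) := by
  induction l with
  | nil => exact List.Pairwise.nil
  | cons x xs ih =>
    rw [List.pairwise_cons] at h ⊢
    rw [List.nodup_cons] at hn
    exact ⟨fun z hz => pvLt_total_ne z x (h.1 z hz) (fun he => hn.1 (he ▸ hz)),
      ih h.2 hn.2⟩

-- two strictly ascending lists with the same members are equal
lemma strict_sorted_unique (l₁ : List (Int × Int)) :
    ∀ l₂ : List (Int × Int), l₁.Pairwise (fun a b => pvLt a b = true) →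
    l₂.Pairwise (fun a b => pvLt a b = true) →
    (∀ x, x ∈ l₁ ↔ x ∈ l₂) → l₁ = l₂ := by
  induction l₁ with
  | nil =>
    intro l₂ _ _ hmem
    cases l₂ with
    | nil => rfl
    | cons y ys => exact absurd ((hmem y).2 (by simp)) (by simp)
  | cons x xs ih =>
    intro l₂ h₁ h₂ hmem
    cases l₂ with
    | nil => exact absurd ((hmem x).1 (by simp)) (by simp)
    | cons y ys =>
      rw [List.pairwise_cons] at h₁ h₂
      have hxy : x = y := by
        rcases List.mem_cons.1 ((hmem x).1 (by simp)) with h | hxys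
        · exact h
        · rcases List.mem_cons.1 ((hmem y).2 (by simp)) with h | hyxs
          · exact h.symm
          · -- x ∈ ys and y ∈ xs: pvLt y x and pvLt x y, absurd
            have h1 := h₂.1 x hxys
            have h2 := h₁.1 y hyxs
            rw [pvLt_asym x y h2] at h1
            exact absurd h1 (by simp)
      subst hxy
      have htails : ∀ z, z ∈ xs ↔ z ∈ ys := by
        intro z
        constructor
        · intro hz
          rcases List.mem_cons.1 ((hmem z).1 (List.mem_cons_of_mem _ hz)) with rfl | h
          · exact absurd (h₁.1 z hz) (by simp [pvLt_irrefl])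
          · exact h
        · intro hz
          rcases List.mem_cons.1 ((hmem z).2 (List.mem_cons_of_mem _ hz)) with rfl | h
          · exact absurd (h₂.1 z hz) (by simp [pvLt_irrefl])
          · exact h
      rw [ih ys h₁.2 h₂.2 htails]

-- A's loop keeps seen = out: its second component is the Set.add fold (= Set.ofList restarted at seen)
lemma a_loop_eq_ofList_fold (l : List (Int × Int)) (s : List (Int × Int)) :
    (l.foldl
      (fun (st : PySem.Set (Int × Int) × List (Int × Int)) item =>
        if !(PySem.Set.contains st.1 item) then (PySem.Set.add st.1 item, st.2 ++ [item]) else st)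
      (s, s)).2 = l.foldl PySem.Set.add s := by
  induction l generalizing s with
  | nil => rfl
  | cons x xs ih =>
    simp only [List.foldl_cons]
    by_cases hm : x ∈ s
    · rw [if_neg (by simp [hm])]
      have : PySem.Set.add s x = s := by simp [PySem.Set.add, hm]
      rw [this]
      exact ih s
    · rw [if_pos (by simp [hm])]
      have : PySem.Set.add s x = s ++ [x] := by simp [PySem.Set.add, hm]
      rw [this]
      exact ih (s ++ [x])

lemma dedup_sorted_py_eq_ofList (items : List (Int × Int)) :
    dedup_sorted_py items =
      PySem.Set.ofList (PySem.List.sorted2 items (fun x => x.1) (fun x => x.2)) := by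
  unfold dedup_sorted_py
  show ((PySem.List.sorted2 items (fun x => x.1) (fun x => x.2)).foldl _
    (([] : List (Int × Int)), ([] : List (Int × Int)))).2 = _
  rw [a_loop_eq_ofList_fold _ [], PySem.Set.ofList_eq_foldl]

-- foldl Set.add acc l is a sublist of acc ++ l
lemma foldl_add_sublist (l : List (Int × Int)) :
    ∀ acc : List (Int × Int), (l.foldl PySem.Set.add acc).Sublist (acc ++ l) := by
  induction l with
  | nil => intro acc; simp
  | cons x xs ih =>
    intro acc
    simp only [List.foldl_cons]
    have h1 : (xs.foldl PySem.Set.add (PySem.Set.add acc x)).Sublist (PySem.Set.add acc x ++ xs) :=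
      ih _
    have h2 : (PySem.Set.add acc x).Sublist (acc ++ [x]) := by
      by_cases hm : x ∈ acc
      · simp [PySem.Set.add, hm]
      · simp [PySem.Set.add, hm]
    simpa using h1.trans (h2.append_right xs)

lemma ofList_sublist (l : List (Int × Int)) : (PySem.Set.ofList l).Sublist l := by
  rw [PySem.Set.ofList_eq_foldl]
  simpa using foldl_add_sublist l []

-- ===== VERDICT (by name: the statement is the Claim_ definition above) =====
theorem dedup_sorted_py_spec : Claim_equal_dedup_sorted_py := by
  intro items _
  show dedup_sorted_py items = dedup_sorted_py_alt items
  rw [dedup_sorted_py_eq_ofList]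
  unfold dedup_sorted_py_alt
  -- both sides are strictly ascending lists with the same members
  apply strict_sorted_unique
  · -- A: ofList of the sorted list, pairwise non-descending by sublist, nodup by ofList
    exact pairwise_lt_of_pairwise_nge_nodup _
      ((sorted2_pairwise items).sublist (ofList_sublist _))
      (PySem.Set.nodup_ofList _)
  · -- B: sorted2 of the duplicate-free set, nodup via the sort being a permutation
    exact pairwise_lt_of_pairwise_nge_nodup _
      (sorted2_pairwise _)
      ((PySem.List.sorted2_perm _ _ _ _).nodup_iff.2 (PySem.Set.nodup_ofList _))
  · intro x
    rw [PySem.Set.mem_ofList, (PySem.List.sorted2_perm _ _ _ _).mem_iff,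
      (PySem.List.sorted2_perm _ _ _ _).mem_iff, PySem.Set.mem_ofList]
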